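-- pv_equiv track=rewrite | github.com/Kyle-Meyer/Interweaving-Python | analysis_vis/analysis.py | generate_worst_case_test
-- ===== SOURCE A (Python) =====
-- def generate_worst_case_test(signal_length, x_length, y_length):
--     # Create pattern X with alternating bits
--     pattern_x = ""
--     for i in range(x_length):
--         pattern_x += "0" if i % 2 == 0 else "1"
--
--     # Create pattern Y that's identical to X except for the last bit
--     # This maximizes the number of shared states
--     pattern_y = pattern_x[:-1]
--     pattern_y += "0" if pattern_x[-1] == "1" else "1"
--
--     # Create a signal that will force maximum state tracking
--     # Strategy: repeat a sequence that matches both pattern prefixes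
--     # but never quite completes both patterns simultaneously
--
--     common_prefix = pattern_x[:-1]  # Prefix shared by both patterns
--     signal_fragments = []
--
--     # Create segments that match the common prefix but then diverge
--     segment_length = len(common_prefix) + 1
--     segments_needed = signal_length // segment_length + 1
--
--     for i in range(segments_needed):
--         # Add the common prefix
--         signal_fragments.append(common_prefix)
--
--         # Add a bit that could extend either pattern
--         # Alternate between matching X's last bit and Y's last bit
--         signal_fragments.append(pattern_x[-1] if i % 2 == 0 else pattern_y[-1])
--
--     # Trim to exact length needed
--     signal = "".join(signal_fragments)[:signal_length]
--
--     return signal, pattern_x, pattern_y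
-- ===== SOURCE B (Python) =====
-- def generate_worst_case_test(signal_length, x_length, y_length):
--     # Pattern X: alternating bits, built by slicing a repeated "01" block
--     pattern_x = ("01" * (x_length // 2 + 1))[:x_length]
--     # Pattern Y: same as X with the last bit flipped
--     pattern_y = pattern_x[:-1] + ("0" if pattern_x[-1] == "1" else "1")
--     # The signal is periodic with period pattern_x + pattern_y: tile and trim
--     block = pattern_x + pattern_y
--     sig = (block * (signal_length // len(block) + 1))[:signal_length]
--     return sig, pattern_x, pattern_y
-- ===== Notes on version B (the rewrite author's own statement) =====
-- stated objective: simpler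
-- what changed: B replaces A's character-by-character pattern loop and segment-appending fragment loop with closed-form tiling: pattern_x is a sliced repetition of "01", and the signal is the periodic block pattern_x + pattern_y repeated and trimmed to signal_length. (measured faster: bulk str-multiply/slice replaces per-character and per-segment string appends)
import Mathlib
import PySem

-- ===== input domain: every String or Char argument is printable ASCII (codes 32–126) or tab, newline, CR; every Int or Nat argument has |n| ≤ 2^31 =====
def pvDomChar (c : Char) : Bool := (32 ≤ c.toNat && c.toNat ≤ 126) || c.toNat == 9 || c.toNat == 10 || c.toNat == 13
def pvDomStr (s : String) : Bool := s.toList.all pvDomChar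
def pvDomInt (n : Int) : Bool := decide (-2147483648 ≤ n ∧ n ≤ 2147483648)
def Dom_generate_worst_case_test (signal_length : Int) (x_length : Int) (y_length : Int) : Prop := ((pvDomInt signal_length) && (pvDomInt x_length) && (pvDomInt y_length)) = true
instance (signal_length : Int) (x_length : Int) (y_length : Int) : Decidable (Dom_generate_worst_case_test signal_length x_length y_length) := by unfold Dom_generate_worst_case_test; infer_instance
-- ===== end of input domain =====

-- B derives the signal from its periodicity, tiling the block pattern_x ++ pattern_y and trimming,
-- instead of A's segment-appending loop (objective: simpler).

-- ===== PORT A =====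
def generate_worst_case_test (signal_length : Int) (x_length : Int) (y_length : Int) : String × String × String :=
  -- pattern_x = ""; for i in range(x_length): pattern_x += "0" if i % 2 == 0 else "1"
  let pattern_x : List Char :=
    (PySem.List.pyRange 0 x_length 1).foldl
      (fun acc i => acc ++ (if PySem.Int.mod i 2 = 0 then ['0'] else ['1'])) []
  -- pattern_y = pattern_x[:-1]; pattern_y += "0" if pattern_x[-1] == "1" else "1"
  -- (pattern_x[-1] raises IndexError when pattern_x is empty: those inputs are outside Pre_)
  let pattern_y : List Char :=
    PySem.List.slice pattern_x none (some (-1)) ++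
      (if PySem.List.pyGetD pattern_x (-1) ' ' = '1' then ['0'] else ['1'])
  let common_prefix := PySem.List.slice pattern_x none (some (-1))
  let segment_length := PySem.List.len common_prefix + 1
  let segments_needed := PySem.Int.floordiv signal_length segment_length + 1
  let signal_fragments : List (List Char) :=
    (PySem.List.pyRange 0 segments_needed 1).foldl
      (fun acc i =>
        (acc ++ [common_prefix]) ++
          [if PySem.Int.mod i 2 = 0 then [PySem.List.pyGetD pattern_x (-1) ' ']
           else [PySem.List.pyGetD pattern_y (-1) ' ']]) []
  let signal := PySem.List.slice (PySem.Chars.join [] signal_fragments) none (some signal_length)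
  (String.ofList signal, String.ofList pattern_x, String.ofList pattern_y)

-- ===== PORT B =====
def generate_worst_case_test_alt (signal_length : Int) (x_length : Int) (y_length : Int) : String × String × String :=
  -- pattern_x = ("01" * (x_length // 2 + 1))[:x_length]
  let pattern_x : List Char :=
    PySem.List.slice (PySem.List.pyRepeat ['0', '1'] (PySem.Int.floordiv x_length 2 + 1))
      none (some x_length)
  -- pattern_y = pattern_x[:-1] + ("0" if pattern_x[-1] == "1" else "1")
  let pattern_y : List Char :=
    PySem.List.slice pattern_x none (some (-1)) ++
      (if PySem.List.pyGetD pattern_x (-1) ' ' = '1' then ['0'] else ['1'])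
  -- block = pattern_x + pattern_y; signal = (block * (signal_length // len(block) + 1))[:signal_length]
  let block := pattern_x ++ pattern_y
  let signal := PySem.List.slice
      (PySem.List.pyRepeat block (PySem.Int.floordiv signal_length (PySem.List.len block) + 1))
      none (some signal_length)
  (String.ofList signal, String.ofList pattern_x, String.ofList pattern_y)

-- ===== PRECONDITION & SPEC =====
-- Pre_ excludes exactly x_length ≤ 0, where the Python A raises IndexError on pattern_x[-1].
def Pre_generate_worst_case_test (signal_length : Int) (x_length : Int) (y_length : Int) : Prop :=
  1 ≤ x_length
instance (signal_length : Int) (x_length : Int) (y_length : Int) : Decidable (Pre_generate_worst_case_test signal_length x_length y_length) := by unfold Pre_generate_worst_case_test; infer_instance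

def pvWitness_generate_worst_case_test : Int × Int × Int := (7, 3, 3)

def Spec_generate_worst_case_test (signal_length : Int) (x_length : Int) (y_length : Int) (out : String × String × String) : Prop := out = generate_worst_case_test_alt signal_length x_length y_length
instance (signal_length : Int) (x_length : Int) (y_length : Int) (out : String × String × String) : Decidable (Spec_generate_worst_case_test signal_length x_length y_length out) := by unfold Spec_generate_worst_case_test; infer_instance

-- ===== CLAIM (what is proved, stated in full; the proofs are below) =====
def Claim_equal_generate_worst_case_test : Prop := ∀ (signal_length : Int) (x_length : Int) (y_length : Int), Dom_generate_worst_case_test signal_length x_length y_length → Pre_generate_worst_case_test signal_length x_length y_length → Spec_generate_worst_case_test signal_length x_length y_length (generate_worst_case_test signal_length x_length y_length)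

-- ===== LEMMAS AND PROOFS =====

-- the alternating-bit pattern of length n, the value both pattern_x computations reach
def pvAltPat (n : Nat) : List Char := (List.range n).map (fun i => if i % 2 = 0 then '0' else '1')

-- the signal made of k segments (common prefix + one alternating tail bit), A's joined fragments
def pvSegJoin (cp : List Char) (xl yl : Char) : Nat → List Char
  | 0 => []
  | k + 1 => pvSegJoin cp xl yl k ++ (cp ++ [if k % 2 = 0 then xl else yl])

lemma pv_join_nil (l : List (List Char)) : PySem.Chars.join [] l = l.flatten := by
  simp only [PySem.Chars.join, List.intercalate]
  induction l with
  | nil => rfl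
  | cons x xs ih =>
    cases xs with
    | nil => simp
    | cons y ys =>
      simp only [List.intersperse] at ih ⊢
      simp_all

lemma pv_mod2 (k : Nat) : PySem.Int.mod (k : Int) 2 = ((k % 2 : Nat) : Int) := by
  exact_mod_cast PySem.Int.mod_natCast k 2

lemma pv_bit (xs ys : List Char) (a : Nat) :
    (if PySem.Int.mod ((a : Nat) : Int) 2 = 0 then xs else ys) =
      (if a % 2 = 0 then xs else ys) := by
  rw [pv_mod2]
  rcases Nat.mod_two_eq_zero_or_one a with h | h <;> simp [h]

lemma pv_A_pattern (n : Nat) :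
    (PySem.List.pyRange 0 (n : Int) 1).foldl
      (fun acc i => acc ++ (if PySem.Int.mod i 2 = 0 then ['0'] else ['1'])) [] = pvAltPat n := by
  rw [PySem.List.pyRange_zero_natCast, PySem.List.foldl_append_eq_flatMap]
  simp only [List.nil_append, List.flatMap_map, pv_bit]
  induction n with
  | zero => rfl
  | succ m ih =>
    rw [List.range_succ, List.flatMap_append, ih]
    simp only [pvAltPat, List.range_succ, List.map_append, List.flatMap_cons, List.flatMap_nil,
      List.append_nil, List.map_cons, List.map_nil]
    rcases Nat.mod_two_eq_zero_or_one m with h | h <;> simp [h]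

lemma pv_flat_rep (j : Nat) :
    (List.replicate j ['0', '1']).flatten = pvAltPat (2 * j) := by
  induction j with
  | zero => rfl
  | succ m ih =>
    rw [List.replicate_succ', List.flatten_append, ih]
    have h2 : 2 * (m + 1) = (2 * m + 1) + 1 := by omega
    simp only [pvAltPat, h2, List.range_succ, List.map_append]
    have e1 : (2 * m) % 2 = 0 := by omega
    have e2 : (2 * m + 1) % 2 = 1 := by omega
    simp [e1, e2]

lemma pv_B_pattern (n : Nat) :
    PySem.List.slice (PySem.List.pyRepeat ['0', '1'] (PySem.Int.floordiv (n : Int) 2 + 1))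
      none (some (n : Int)) = pvAltPat n := by
  have hd : PySem.Int.floordiv (n : Int) 2 + 1 = ((n / 2 + 1 : Nat) : Int) := by
    rw [show ((2 : Int)) = ((2 : Nat) : Int) from rfl, PySem.Int.floordiv_natCast]
    push_cast
    ring
  rw [hd, PySem.List.slice_to _ (by positivity), PySem.List.pyRepeat]
  have ht : ((n / 2 + 1 : Nat) : Int).toNat = n / 2 + 1 := by omega
  rw [ht, pv_flat_rep]
  have hle : n ≤ 2 * (n / 2 + 1) := by omega
  simp only [Int.toNat_natCast, pvAltPat, ← List.map_take, List.take_range]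
  rw [Nat.min_eq_left hle]

lemma pv_altPat_len (n : Nat) : (pvAltPat n).length = n := by
  simp [pvAltPat]

lemma pv_altPat_ne_nil (n : Nat) (hn : 1 ≤ n) : pvAltPat n ≠ [] := by
  intro h
  have := pv_altPat_len n
  rw [h] at this
  simp at this
  omega

lemma pv_segJoin_length (cp : List Char) (xl yl : Char) (k : Nat) :
    (pvSegJoin cp xl yl k).length = k * (cp.length + 1) := by
  induction k with
  | zero => simp [pvSegJoin]
  | succ m ih =>
    simp only [pvSegJoin, List.length_append, List.length_cons, List.length_nil, ih]
    ring

lemma pv_segJoin_prefix (cp : List Char) (xl yl : Char) {k k' : Nat} (h : k ≤ k') :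
    pvSegJoin cp xl yl k <+: pvSegJoin cp xl yl k' := by
  induction k' with
  | zero => simp_all
  | succ m ih =>
    rcases Nat.lt_or_ge k (m + 1) with hlt | hge
    · exact (ih (by omega)).trans ⟨_, rfl⟩
    · have hk : k = m + 1 := by omega
      subst hk
      exact List.prefix_refl _

lemma pv_segJoin_double (cp : List Char) (xl yl : Char) (j : Nat) :
    pvSegJoin cp xl yl (2 * j) = (List.replicate j ((cp ++ [xl]) ++ (cp ++ [yl]))).flatten := by
  induction j with
  | zero => rfl
  | succ m ih =>
    have h2 : 2 * (m + 1) = (2 * m + 1) + 1 := by omega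
    rw [h2]
    simp only [pvSegJoin, ih]
    have e1 : (2 * m) % 2 = 0 := by omega
    have e2 : (2 * m + 1) % 2 = 1 := by omega
    rw [List.replicate_succ', List.flatten_append]
    simp [e1, e2]

lemma pv_take_of_prefix {l₁ l₂ : List Char} (h : l₁ <+: l₂) {m : Nat} (hm : m ≤ l₁.length) :
    l₂.take m = l₁.take m := by
  obtain ⟨t, rfl⟩ := h
  exact List.take_append_of_le_length hm

lemma pv_A_joined (cp : List Char) (xl yl : Char) (k : Nat) :
    PySem.Chars.join [] ((PySem.List.pyRange 0 ((k : Nat) : Int) 1).foldl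
      (fun acc i => (acc ++ [cp]) ++ [if PySem.Int.mod i 2 = 0 then [xl] else [yl]]) []) =
      pvSegJoin cp xl yl k := by
  rw [pv_join_nil, PySem.List.pyRange_zero_natCast, List.foldl_map]
  induction k with
  | zero => rfl
  | succ m ih =>
    rw [List.range_succ, List.foldl_append, List.foldl_cons, List.foldl_nil]
    simp only [List.flatten_append, List.flatten_cons, List.flatten_nil, ih]
    rw [pv_bit [xl] [yl] m]
    rcases Nat.mod_two_eq_zero_or_one m with h | h <;>
      simp [pvSegJoin, h, List.append_assoc]

lemma pv_pyRange_nonpos (b : Int) (h : b ≤ 0) : PySem.List.pyRange 0 b 1 = [] := by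
  simp [PySem.List.pyRange]
  omega

lemma pv_slice_nil (b : Int) : PySem.List.slice ([] : List Char) none (some b) = [] := by
  simp [PySem.List.slice]

-- ===== VERDICT (by name: the statement is the Claim_ definition above) =====
theorem generate_worst_case_test_spec : Claim_equal_generate_worst_case_test := by
  intro sl x y _ hpre
  unfold Pre_generate_worst_case_test at hpre
  unfold Spec_generate_worst_case_test
  obtain ⟨n, rfl, hn⟩ : ∃ n : Nat, x = (n : Int) ∧ 1 ≤ n := ⟨x.toNat, by omega, by omega⟩
  simp only [generate_worst_case_test, generate_worst_case_test_alt, pv_A_pattern, pv_B_pattern]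
  have hPne : pvAltPat n ≠ [] := pv_altPat_ne_nil n hn
  have hPlen : (pvAltPat n).length = n := pv_altPat_len n
  simp only [PySem.List.slice_to_neg_one, PySem.List.pyGetD_neg_one (pvAltPat n) ' ' hPne,
    PySem.List.len_eq]
  have hcplen : (pvAltPat n).dropLast.length = n - 1 := by
    simp [hPlen]
  set xl := (pvAltPat n).getLast hPne with hxl
  set fl := (if xl = '1' then '0' else '1') with hfl
  have hflip : (if xl = '1' then ['0'] else ['1']) = [fl] := by
    by_cases h : xl = '1' <;> simp [hfl, h]
  simp only [hflip, PySem.List.pyGetD_neg_one_append_singleton]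
  have hseg : ((((pvAltPat n).dropLast.length : Nat) : Int) + 1) = (n : Int) := by
    rw [hcplen]; omega
  have hblen : ((pvAltPat n) ++ ((pvAltPat n).dropLast ++ [fl])).length = 2 * n := by
    simp [hPlen, hcplen]; omega
  rw [hseg, hblen]
  rcases (by omega : 0 ≤ sl ∨ sl < 0) with hsl | hsl
  · -- sl ≥ 0
    obtain ⟨m, rfl⟩ : ∃ m : Nat, sl = (m : Int) := ⟨sl.toNat, by omega⟩
    have hA : PySem.Int.floordiv (m : Int) (n : Int) + 1 = ((m / n + 1 : Nat) : Int) := by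
      rw [PySem.Int.floordiv_natCast]; push_cast; ring
    have hB : PySem.Int.floordiv (m : Int) ((2 * n : Nat) : Int) + 1 =
        ((m / (2 * n) + 1 : Nat) : Int) := by
      rw [PySem.Int.floordiv_natCast]; push_cast; ring
    rw [hA, hB, pv_A_joined (pvAltPat n).dropLast xl fl (m / n + 1), PySem.List.pyRepeat]
    have hrep : (List.replicate (((m / (2 * n) + 1 : Nat) : Int)).toNat
        ((pvAltPat n) ++ ((pvAltPat n).dropLast ++ [fl]))).flatten =
        pvSegJoin (pvAltPat n).dropLast xl fl (2 * (m / (2 * n) + 1)) := by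
      rw [Int.toNat_natCast, pv_segJoin_double, hxl, List.dropLast_append_getLast hPne]
    rw [hrep, PySem.List.slice_to _ (by positivity), PySem.List.slice_to _ (by positivity),
      Int.toNat_natCast]
    have hlen1 : m ≤ (pvSegJoin (pvAltPat n).dropLast xl fl (m / n + 1)).length := by
      rw [pv_segJoin_length, hcplen]
      have h3 : n - 1 + 1 = n := by omega
      rw [h3]
      have h2 := Nat.mod_lt m (show 0 < n by omega)
      nlinarith [Nat.div_add_mod m n]
    have hlen2 : m ≤ (pvSegJoin (pvAltPat n).dropLast xl fl (2 * (m / (2 * n) + 1))).length := by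
      rw [pv_segJoin_length, hcplen]
      have h3 : n - 1 + 1 = n := by omega
      rw [h3]
      have h2 := Nat.mod_lt m (show 0 < 2 * n by omega)
      nlinarith [Nat.div_add_mod m (2 * n)]
    have e1 := pv_take_of_prefix
      (pv_segJoin_prefix (pvAltPat n).dropLast xl fl
        (le_max_left (m / n + 1) (2 * (m / (2 * n) + 1)))) hlen1
    have e2 := pv_take_of_prefix
      (pv_segJoin_prefix (pvAltPat n).dropLast xl fl
        (le_max_right (m / n + 1) (2 * (m / (2 * n) + 1)))) hlen2
    rw [← e1, ← e2]
  · -- sl < 0 : both signals are empty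
    have hA0 : PySem.Int.floordiv sl (n : Int) + 1 ≤ 0 := by
      have h := (PySem.Int.floordiv_lt_iff_lt_mul
        (a := sl) (b := (n : Int)) (q := 0) (by exact_mod_cast hn)).mpr (by omega)
      linarith
    have hB0 : PySem.Int.floordiv sl ((2 * n : Nat) : Int) + 1 ≤ 0 := by
      have h := (PySem.Int.floordiv_lt_iff_lt_mul
        (a := sl) (b := ((2 * n : Nat) : Int)) (q := 0)
        (by push_cast; omega)).mpr (by omega)
      linarith
    rw [pv_pyRange_nonpos _ hA0, PySem.List.pyRepeat,
      Int.toNat_of_nonpos hB0]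
    simp only [List.foldl_nil, List.replicate_zero, List.flatten_nil, pv_join_nil,
      pv_slice_nil]
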